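-- pv_equiv track=rewrite | github.com/wzdnzd/aggregator | tools/purefast.py | add_or_replace
-- ===== SOURCE A (Python) =====
-- def add_or_replace(source: str, dest: str) -> str:
--     def covertto(content: str) -> dict:
--         targets = {}
--         if isblank(content):
--             return targets
--
--         for text in content.split(";"):
--             text = text.strip()
--             words = text.split("=", maxsplit=1)
--             if len(words) != 2 or isblank(words[0]):
--                 continue
--             targets[words[0]] = words[1]
--
--         return targets
--
--     if isblank(dest):
--         return source
--
--     raws, others = covertto(source), covertto(dest)
--     raws.update(others)
--     items = [f"{k}={v}" for k, v in raws.items() if not isblank(v)]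
--     return "; ".join(items)
--
-- def isblank(text: str) -> bool:
--     return not text or type(text) != str or not text.strip()
-- ===== SOURCE B (Python) =====
-- def add_or_replace(source: str, dest: str) -> str:
--     if isblank(dest):
--         return source
--     # collect every key=value pair from both strings into one flat list (no dict)
--     pairs = []
--     for part in (source, dest):
--         for seg in part.split(";"):
--             words = seg.strip().split("=", maxsplit=1)
--             if len(words) == 2 and words[0].strip():
--                 pairs.append((words[0], words[1]))
--     # emit each key at its first occurrence, with the value of its last occurrence
--     out, seen = [], []
--     for k, _ in pairs:
--         if k in seen:
--             continue
--         seen.append(k)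
--         v = [vv for kk, vv in pairs if kk == k][-1]
--         if v.strip():
--             out.append(f"{k}={v}")
--     return "; ".join(out)
--
-- def isblank(text: str) -> bool:
--     return not text or type(text) != str or not text.strip()
-- ===== Notes on version B (the rewrite author's own statement) =====
-- stated objective: alternative
-- what changed: A parses source and dest into two ordered dicts and merges them with dict.update; B uses no dict at all: it collects all key=value pairs into one flat list and emits each key at its first occurrence with the value found by a last-occurrence scan over the list (seen-list to skip repeats).
import Mathlib
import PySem

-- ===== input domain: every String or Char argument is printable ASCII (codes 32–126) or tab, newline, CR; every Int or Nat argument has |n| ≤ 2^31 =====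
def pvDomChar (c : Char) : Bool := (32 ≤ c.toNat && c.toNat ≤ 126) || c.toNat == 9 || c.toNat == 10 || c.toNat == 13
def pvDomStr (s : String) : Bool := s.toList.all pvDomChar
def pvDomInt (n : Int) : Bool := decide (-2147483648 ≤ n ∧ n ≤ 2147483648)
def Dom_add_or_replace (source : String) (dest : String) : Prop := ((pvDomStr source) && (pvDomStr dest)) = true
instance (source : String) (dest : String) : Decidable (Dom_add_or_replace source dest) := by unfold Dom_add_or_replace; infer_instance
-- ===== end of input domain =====

-- B is dict-free: one flat list of all key=value pairs, each key emitted at its first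
-- occurrence with the value of its last occurrence (objective: alternative algorithm).

-- ===== PORT A =====

-- isblank(text): 'not text or type(text) != str or not text.strip()'; the type test is
-- always False for a str argument, so it is 'text == "" or text.strip() == ""'.
def pvIsblank (text : String) : Bool :=
  (text == "") || (PySem.Str.strip text == "")

-- covertto(content): parse 'k=v;...' into a dict (first-occurrence order, last value wins)
def pvCovertto (content : String) : PySem.Dict String String :=
  if pvIsblank content then PySem.Dict.empty
  else
    ((PySem.Str.split? content ";").getD []).foldl
      (fun targets text =>
        let text := PySem.Str.strip text
        let words := (PySem.Str.splitMax? text "=" 1).getD []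
        if words.length ≠ 2 || pvIsblank (words.headD "") then targets
        else targets.insert (words.headD "") (words.getD 1 ""))
      PySem.Dict.empty

def add_or_replace (source : String) (dest : String) : String :=
  if pvIsblank dest then source
  else
    let raws := pvCovertto source
    let others := pvCovertto dest
    let merged := raws.update others.items
    let items := (merged.items.filter (fun kv => !pvIsblank kv.2)).map
      (fun kv => kv.1 ++ "=" ++ kv.2)
    PySem.Str.join "; " items

-- ===== PORT B =====

-- the inner loop body of B's parsing pass: append the pair of one segment, if any
def pvSegStep (acc : List (String × String)) (seg : String) : List (String × String) :=
  let words := (PySem.Str.splitMax? (PySem.Str.strip seg) "=" 1).getD []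
  if words.length == 2 && (PySem.Str.strip (words.headD "") != "") then
    acc ++ [(words.headD "", words.getD 1 "")]
  else acc

-- '[vv for kk, vv in pairs if kk == k][-1]'
def pvLastVal (pairs : List (String × String)) (k : String) : String :=
  (pairs.filterMap (fun q => if q.1 == k then some q.2 else none)).getLastD ""

-- the body of B's emit loop, over state (out, seen)
def pvMergeStep (pairs : List (String × String)) (st : List String × List String)
    (kp : String × String) : List String × List String :=
  if st.2.contains kp.1 then st
  else
    let seen := st.2 ++ [kp.1]
    let v := pvLastVal pairs kp.1
    if PySem.Str.strip v != "" then (st.1 ++ [kp.1 ++ "=" ++ v], seen)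
    else (st.1, seen)

def add_or_replace_alt (source : String) (dest : String) : String :=
  if pvIsblank dest then source
  else
    let pairs := [source, dest].foldl
      (fun acc part => ((PySem.Str.split? part ";").getD []).foldl pvSegStep acc) []
    let res := pairs.foldl (pvMergeStep pairs) ([], [])
    PySem.Str.join "; " res.1

-- ===== PRECONDITION & SPEC =====
def Spec_add_or_replace (source : String) (dest : String) (out : String) : Prop := out = add_or_replace_alt source dest
instance (source : String) (dest : String) (out : String) : Decidable (Spec_add_or_replace source dest out) := by unfold Spec_add_or_replace; infer_instance

-- ===== CLAIM (what is proved, stated in full; the proofs are below) =====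
def Claim_equal_add_or_replace : Prop := ∀ (source : String) (dest : String), Dom_add_or_replace source dest → Spec_add_or_replace source dest (add_or_replace source dest)

-- ===== LEMMAS AND PROOFS =====

-- ## characterisation of split on a single-char separator
def pvSplitAux (c : Char) : List Char → List Char → List (List Char)
  | [], cur => [cur.reverse]
  | x :: rest, cur => if c = x then cur.reverse :: pvSplitAux c rest [] else pvSplitAux c rest (x :: cur)

theorem pv_go_eq (c : Char) (fuel : Nat) (l cur : List Char) (acc : List (List Char))
    (h : l.length < fuel) :
    PySem.Chars.splitOn.go [c] fuel l cur acc = acc.reverse ++ pvSplitAux c l cur := by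
  induction fuel generalizing l cur acc with
  | zero => omega
  | succ fuel ih =>
    cases l with
    | nil => simp [PySem.Chars.splitOn.go, pvSplitAux]
    | cons x rest =>
      by_cases hc : c = x
      · subst hc
        rw [show PySem.Chars.splitOn.go [c] (fuel + 1) (c :: rest) cur acc
            = PySem.Chars.splitOn.go [c] fuel rest [] (cur.reverse :: acc) by
          simp [PySem.Chars.splitOn.go, List.isPrefixOf]]
        rw [ih rest [] (cur.reverse :: acc) (by simpa using Nat.lt_of_succ_lt_succ h)]
        simp [pvSplitAux]
      · rw [show PySem.Chars.splitOn.go [c] (fuel + 1) (x :: rest) cur acc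
            = PySem.Chars.splitOn.go [c] fuel rest (x :: cur) acc by
          simp [PySem.Chars.splitOn.go, List.isPrefixOf, hc]]
        rw [ih rest (x :: cur) acc (by simpa using Nat.lt_of_succ_lt_succ h)]
        simp [pvSplitAux, hc]

theorem pv_splitOn_eq (c : Char) (l : List Char) :
    PySem.Chars.splitOn l [c] = pvSplitAux c l [] := by
  unfold PySem.Chars.splitOn
  rw [pv_go_eq c (l.length + 1) l [] [] (by omega)]
  simp

theorem pv_mem_splitAux (c : Char) (l cur seg : List Char) (hseg : seg ∈ pvSplitAux c l cur)
    (ch : Char) (hch : ch ∈ seg) : ch ∈ cur ∨ ch ∈ l := by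
  induction l generalizing cur with
  | nil =>
    simp [pvSplitAux] at hseg
    subst hseg
    exact Or.inl (by simpa using hch)
  | cons x rest ih =>
    by_cases hc : c = x
    · subst hc
      have hstep : pvSplitAux c (c :: rest) cur = cur.reverse :: pvSplitAux c rest [] := by
        simp [pvSplitAux]
      rw [hstep] at hseg
      rcases List.mem_cons.mp hseg with hseg | hseg
      · subst hseg; exact Or.inl (by simpa using hch)
      · rcases ih [] hseg with h | h
        · simp at h
        · exact Or.inr (by simp [h])
    · simp only [pvSplitAux, if_neg hc] at hseg
      rcases ih (x :: cur) hseg with h | h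
      · rcases List.mem_cons.mp h with h | h
        · exact Or.inr (by simp [h])
        · exact Or.inl h
      · exact Or.inr (by simp [h])

-- ## whitespace-only strings
theorem pv_strip_eq_nil_of_all_space (l : List Char) (h : ∀ ch ∈ l, PySem.Chars.isspace ch = true) :
    PySem.Chars.strip l = [] := by
  unfold PySem.Chars.strip PySem.Chars.lstrip PySem.Chars.rstrip
  rw [List.dropWhile_eq_nil_iff.mpr h]
  simp

theorem pv_isblank_eq (t : String) : pvIsblank t = (PySem.Str.strip t == "") := by
  unfold pvIsblank
  by_cases h : t = ""
  · subst h; decide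
  · simp [h]

theorem pv_all_space_of_strip_eq_nil (l : List Char) (h : PySem.Chars.strip l = []) :
    ∀ ch ∈ l, PySem.Chars.isspace ch = true := by
  unfold PySem.Chars.strip PySem.Chars.lstrip PySem.Chars.rstrip at h
  have h1 : List.dropWhile PySem.Chars.isspace (List.dropWhile PySem.Chars.isspace l).reverse = [] := by
    have := congrArg List.reverse h
    simpa using this
  have h2 : ∀ ch ∈ (List.dropWhile PySem.Chars.isspace l).reverse, PySem.Chars.isspace ch = true :=
    List.dropWhile_eq_nil_iff.mp h1
  intro ch hch
  by_cases hsp : PySem.Chars.isspace ch = true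
  · exact hsp
  · exfalso
    have hmem : ch ∈ List.dropWhile PySem.Chars.isspace l := by
      have hl : List.takeWhile PySem.Chars.isspace l ++ List.dropWhile PySem.Chars.isspace l = l :=
        List.takeWhile_append_dropWhile
      rcases List.mem_append.mp (by rw [hl]; exact hch) with hin | hin
      · exact absurd (List.mem_takeWhile_imp hin) hsp
      · exact hin
    exact hsp (h2 ch (by simpa using hmem))

-- ## the shared segment parser (the pair a segment contributes, if any)
def pvParse (seg : String) : Option (String × String) :=
  let words := (PySem.Str.splitMax? (PySem.Str.strip seg) "=" 1).getD []
  if words.length = 2 ∧ PySem.Str.strip (words.headD "") ≠ "" then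
    some (words.headD "", words.getD 1 "")
  else none

def pvIns (d : PySem.Dict String String) (p : String × String) : PySem.Dict String String :=
  d.insert p.1 p.2

-- A's parse loop is a fold of pvIns over the parsed pairs
theorem pv_foldA (segs : List String) (d : PySem.Dict String String) :
    segs.foldl
      (fun targets text =>
        let text := PySem.Str.strip text
        let words := (PySem.Str.splitMax? text "=" 1).getD []
        if words.length ≠ 2 || pvIsblank (words.headD "") then targets
        else targets.insert (words.headD "") (words.getD 1 "")) d
    = List.foldl pvIns d (segs.filterMap pvParse) := by
  induction segs generalizing d with
  | nil => rfl
  | cons seg segs ih =>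
    rw [List.foldl_cons, List.filterMap_cons]
    have hstep : (let text := PySem.Str.strip seg
        let words := (PySem.Str.splitMax? text "=" 1).getD []
        if words.length ≠ 2 || pvIsblank (words.headD "") then d
        else d.insert (words.headD "") (words.getD 1 ""))
        = match pvParse seg with
          | some p => pvIns d p
          | none => d := by
      simp only [pvParse, pvIns]
      by_cases h1 : ((PySem.Str.splitMax? (PySem.Str.strip seg) "=" 1).getD []).length = 2
      · by_cases h2 : PySem.Str.strip ((((PySem.Str.splitMax? (PySem.Str.strip seg) "=" 1).getD [])).head?.getD "") = ""
        · simp [h1, h2, pv_isblank_eq]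
        · simp [h1, h2, pv_isblank_eq]
      · simp [h1]
    rw [hstep]
    cases hp : pvParse seg with
    | none => simpa [hp] using ih d
    | some p => simp only [List.foldl_cons]; exact ih (pvIns d p)

-- B's parse loop appends the parsed pairs
theorem pv_foldB (segs : List String) (acc : List (String × String)) :
    segs.foldl pvSegStep acc = acc ++ segs.filterMap pvParse := by
  induction segs generalizing acc with
  | nil => simp
  | cons seg segs ih =>
    rw [List.foldl_cons, List.filterMap_cons]
    have hstep : pvSegStep acc seg
        = match pvParse seg with
          | some p => acc ++ [p]
          | none => acc := by
      simp only [pvParse, pvSegStep]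
      by_cases h1 : ((PySem.Str.splitMax? (PySem.Str.strip seg) "=" 1).getD []).length = 2
      · by_cases h2 : PySem.Str.strip ((((PySem.Str.splitMax? (PySem.Str.strip seg) "=" 1).getD [])).head?.getD "") = ""
        · simp [h1, h2]
        · simp [h1, h2]
      · simp [h1]
    rw [hstep]
    cases hp : pvParse seg with
    | none => simpa using ih acc
    | some p => rw [ih (acc ++ [p])]; simp

-- ## a blank string contributes nothing
def pvSegs (s : String) : List String := (PySem.Str.split? s ";").getD []

theorem pv_split_getD (s : String) :
    pvSegs s = (pvSplitAux ';' s.toList []).map String.ofList := by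
  have hsep : (";" : String).toList = [';'] := by decide
  simp [pvSegs, PySem.Str.split?, PySem.Chars.split?, hsep, pv_splitOn_eq]

theorem pv_parse_blank (source : String) (hb : PySem.Str.strip source = "") :
    ∀ seg ∈ pvSegs source, pvParse seg = none := by
  have hchars : PySem.Chars.strip source.toList = [] := by
    have := congrArg String.toList hb
    simpa [PySem.Str.strip] using this
  have hall : ∀ ch ∈ source.toList, PySem.Chars.isspace ch = true :=
    pv_all_space_of_strip_eq_nil source.toList hchars
  intro seg hseg
  rw [pv_split_getD] at hseg
  rcases List.mem_map.mp hseg with ⟨cs, hcs, hcseq⟩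
  have hcsall : ∀ ch ∈ cs, PySem.Chars.isspace ch = true := by
    intro ch hch
    rcases pv_mem_splitAux ';' source.toList [] cs hcs ch hch with h | h
    · simp at h
    · exact hall ch h
  have hstripseg : PySem.Str.strip seg = "" := by
    rw [← hcseq]
    show String.ofList (PySem.Chars.strip (String.ofList cs).toList) = ""
    have hx : (String.ofList cs).toList = cs := by simp
    rw [hx, pv_strip_eq_nil_of_all_space cs hcsall]
  unfold pvParse
  rw [hstripseg]
  decide

-- ## dict insertion-fold lemmas (A's update = one fold of pvIns over all pairs)
theorem pv_insert_comm_of_contains (d : PySem.Dict String String) (k k' : String) (v w : String)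
    (hc : d.contains k = true) (hne : k' ≠ k) :
    (d.insert k v).insert k' w = (d.insert k' w).insert k v := by
  apply PySem.Dict.ext
  have hck' : (d.insert k v).contains k' = d.contains k' := by
    rw [PySem.Dict.contains_insert]
    simp [hne]
  have hck : (d.insert k' w).contains k = true := by
    rw [PySem.Dict.contains_insert]
    simp [hc]
  by_cases h' : d.contains k' = true
  · rw [PySem.Dict.items_insert (d.insert k v) k' w, if_pos (hck'.trans h'),
        PySem.Dict.items_insert d k v, if_pos hc,
        PySem.Dict.items_insert (d.insert k' w) k v, if_pos hck,
        PySem.Dict.items_insert d k' w, if_pos h']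
    rw [List.map_map, List.map_map]
    apply List.map_congr_left
    intro p _
    by_cases h1 : p.1 = k
    · have h2 : p.1 ≠ k' := by rw [h1]; exact fun hh => hne hh.symm
      simp [h1, Ne.symm hne]
    · by_cases h2 : p.1 = k'
      · simp [h2, hne]
      · simp [h1, h2]
  · have h'' : d.contains k' = false := by simpa using h'
    rw [PySem.Dict.items_insert_of_not_contains (d.insert k v) w (hck'.trans h''),
        PySem.Dict.items_insert d k v, if_pos hc,
        PySem.Dict.items_insert (d.insert k' w) k v, if_pos hck,
        PySem.Dict.items_insert_of_not_contains d w h'']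
    rw [List.map_append]
    have hone : List.map (fun p => if (p.1 == k) = true then (k, v) else p) [(k', w)] = [(k', w)] := by
      simp [hne]
    rw [hone]

theorem pv_fold_insert_overwrite (l : List (String × String)) (d : PySem.Dict String String)
    (k v : String) (hc : d.contains k = true) (hl : ∀ p ∈ l, p.1 ≠ k) :
    List.foldl pvIns (d.insert k v) l = (List.foldl pvIns d l).insert k v := by
  induction l generalizing d with
  | nil => rfl
  | cons p l ih =>
    simp only [List.foldl_cons]
    rw [show pvIns (d.insert k v) p = (d.insert k v).insert p.1 p.2 from rfl,
        pv_insert_comm_of_contains d k p.1 v p.2 hc (hl p (by simp))]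
    exact ih (d.insert p.1 p.2)
      (by rw [PySem.Dict.contains_insert]; simp [hc])
      (fun q hq => hl q (by simp [hq]))

theorem pv_fold_items_insert (e : PySem.Dict String String) (k v : String)
    (hn : e.keys.Nodup) (d : PySem.Dict String String) :
    List.foldl pvIns d (e.insert k v).items = (List.foldl pvIns d e.items).insert k v := by
  by_cases hc : e.contains k = true
  · have hk : k ∈ e.items.map Prod.fst := by
      have := (PySem.Dict.contains_iff_mem_keys e k).mp hc
      simpa [PySem.Dict.keys] using this
    rcases List.mem_map.mp hk with ⟨p, hp, hpk⟩
    rcases List.append_of_mem hp with ⟨l1, l2, hitems⟩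
    have hn' : (l1.map Prod.fst ++ p.1 :: l2.map Prod.fst).Nodup := by
      have : e.keys = l1.map Prod.fst ++ p.1 :: l2.map Prod.fst := by
        simp [PySem.Dict.keys, hitems]
      rwa [this] at hn
    have hnotk1 : ∀ q ∈ l1, q.1 ≠ k := by
      intro q hq hqk
      exact (List.nodup_append.mp hn').2.2 q.1 (List.mem_map_of_mem hq) p.1
        (List.mem_cons_self ..) (by rw [hqk, hpk])
    have hnotk2 : ∀ q ∈ l2, q.1 ≠ k := by
      intro q hq hqk
      have hnd := (List.nodup_append.mp hn').2.1
      rw [List.nodup_cons] at hnd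
      have hpq : p.1 = q.1 := by rw [hpk, hqk]
      exact hnd.1 (by rw [hpq]; exact List.mem_map_of_mem hq)
    have hmap : (e.insert k v).items = l1 ++ (k, v) :: l2 := by
      rw [PySem.Dict.items_insert, if_pos hc, hitems, List.map_append, List.map_cons]
      congr 1
      · conv_rhs => rw [← List.map_id l1]
        apply List.map_congr_left
        intro q hq
        have := hnotk1 q hq
        simp [this]
      · congr 1
        · simp [hpk]
        · conv_rhs => rw [← List.map_id l2]
          apply List.map_congr_left
          intro q hq
          have := hnotk2 q hq
          simp [this]
    rw [hmap, hitems, List.foldl_append, List.foldl_append, List.foldl_cons, List.foldl_cons]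
    set d1 := List.foldl pvIns d l1 with hd1
    rw [show pvIns d1 (k, v) = d1.insert k v from rfl,
        show pvIns d1 p = d1.insert p.1 p.2 from rfl, hpk]
    rw [← PySem.Dict.insert_insert_self d1 k p.2 v]
    exact pv_fold_insert_overwrite l2 (d1.insert k p.2) k v
      (by rw [PySem.Dict.contains_insert]; simp) hnotk2
  · have hc' : e.contains k = false := by simpa using hc
    rw [PySem.Dict.items_insert_of_not_contains e v hc', List.foldl_append]
    rfl

theorem pv_fold_items_fold (ps : List (String × String)) (e : PySem.Dict String String)
    (hn : e.keys.Nodup) (d : PySem.Dict String String) :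
    List.foldl pvIns d (List.foldl pvIns e ps).items = List.foldl pvIns (List.foldl pvIns d e.items) ps := by
  induction ps generalizing e with
  | nil => rfl
  | cons p ps ih =>
    simp only [List.foldl_cons, pvIns]
    rw [ih (e.insert p.1 p.2) (PySem.Dict.nodup_keys_insert e p.1 p.2 hn),
        pv_fold_items_insert e p.1 p.2 hn d]

-- ## first-occurrence key list and its properties
def pvFKStep (acc : List String) (k : String) : List String :=
  if acc.contains k then acc else acc ++ [k]

def pvFK (l : List String) : List String := l.foldl pvFKStep []

theorem pv_mem_fk_aux (l : List String) (acc : List String) (x : String) :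
    x ∈ l.foldl pvFKStep acc ↔ x ∈ acc ∨ x ∈ l := by
  induction l generalizing acc with
  | nil => simp
  | cons k l ih =>
    rw [List.foldl_cons]
    by_cases hc : acc.contains k = true
    · have hk : k ∈ acc := List.contains_iff_mem.mp hc
      rw [show pvFKStep acc k = acc from by simp [pvFKStep, hk], ih]
      constructor
      · rintro (h | h)
        · exact Or.inl h
        · exact Or.inr (by simp [h])
      · rintro (h | h)
        · exact Or.inl h
        · rcases List.mem_cons.mp h with h | h
          · exact Or.inl (h ▸ hk)
          · exact Or.inr h
    · have hk : k ∉ acc := fun h => hc (List.contains_iff_mem.mpr h)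
      rw [show pvFKStep acc k = acc ++ [k] from by simp [pvFKStep, hk], ih]
      simp [or_assoc, or_comm, or_left_comm]

theorem pv_mem_fk (l : List String) (x : String) : x ∈ pvFK l ↔ x ∈ l := by
  unfold pvFK; rw [pv_mem_fk_aux]; simp

theorem pv_fk_append (l : List String) (k : String) :
    pvFK (l ++ [k]) = if k ∈ l then pvFK l else pvFK l ++ [k] := by
  unfold pvFK
  rw [List.foldl_append, List.foldl_cons, List.foldl_nil]
  by_cases hm : k ∈ l
  · have hc : k ∈ List.foldl pvFKStep [] l := (pv_mem_fk l k).mpr hm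
    rw [show pvFKStep (List.foldl pvFKStep [] l) k = List.foldl pvFKStep [] l from by
      simp [pvFKStep, hc], if_pos hm]
  · have hc : k ∉ List.foldl pvFKStep [] l := fun h => hm ((pv_mem_fk l k).mp h)
    rw [show pvFKStep (List.foldl pvFKStep [] l) k = List.foldl pvFKStep [] l ++ [k] from by
      simp [pvFKStep, hc], if_neg hm]

-- ## last-value under appending one pair
theorem pv_lastVal_append (l : List (String × String)) (k k' v : String) :
    pvLastVal (l ++ [(k, v)]) k' = if k' = k then v else pvLastVal l k' := by
  unfold pvLastVal
  rw [List.filterMap_append]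
  by_cases h : k' = k
  · subst h
    rw [show List.filterMap (fun q => if q.1 == k' then some q.2 else none) [(k', v)] = [v]
        from by simp, List.getLastD_concat, if_pos rfl]
  · have hne : ¬ ((k : String) = k') := fun hh => h hh.symm
    rw [show List.filterMap (fun q => if q.1 == k' then some q.2 else none) [(k, v)] = []
        from by simp [hne], List.append_nil, if_neg h]

-- ## the merged dict's items, characterised
def pvModel (ps : List (String × String)) : List (String × String) :=
  (pvFK (ps.map Prod.fst)).map (fun k => (k, pvLastVal ps k))

theorem pv_items_model (ps : List (String × String)) :
    (List.foldl pvIns PySem.Dict.empty ps).items = pvModel ps := by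
  induction ps using List.reverseRecOn with
  | nil => rfl
  | append_singleton ps p ih =>
    obtain ⟨k, v⟩ := p
    rw [List.foldl_append, List.foldl_cons, List.foldl_nil]
    set d := List.foldl pvIns PySem.Dict.empty ps with hd
    have hkeys : d.items.map Prod.fst = pvFK (ps.map Prod.fst) := by
      rw [ih]; unfold pvModel; rw [List.map_map]
      rw [show (Prod.fst ∘ fun k : String => (k, pvLastVal ps k)) = id from rfl, List.map_id]
    have hcmem : d.contains k = true ↔ k ∈ ps.map Prod.fst := by
      rw [PySem.Dict.contains_iff_mem_keys]
      have : d.keys = d.items.map Prod.fst := by simp [PySem.Dict.keys]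
      rw [this, hkeys, pv_mem_fk]
    show (d.insert k v).items = pvModel (ps ++ [(k, v)])
    unfold pvModel
    rw [List.map_append, show List.map Prod.fst [(k, v)] = [k] from rfl, pv_fk_append]
    by_cases hm : k ∈ ps.map Prod.fst
    · rw [if_pos hm]
      rw [PySem.Dict.items_insert, if_pos (hcmem.mpr hm), ih]
      unfold pvModel
      rw [List.map_map]
      apply List.map_congr_left
      intro k' _
      by_cases hk : k' = k
      · subst hk
        simp [pv_lastVal_append]
      · simp [hk, pv_lastVal_append, Function.comp]
    · rw [if_neg hm]
      have hc' : d.contains k = false :=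
        Bool.eq_false_iff.mpr (fun hh => hm (hcmem.mp hh))
      rw [PySem.Dict.items_insert_of_not_contains d v hc', ih]
      unfold pvModel
      rw [List.map_append]
      congr 1
      · apply List.map_congr_left
        intro k' hk'
        have hk'mem : k' ∈ ps.map Prod.fst := (pv_mem_fk _ k').mp hk'
        have hne : k' ≠ k := fun hh => hm (hh ▸ hk'mem)
        simp [pv_lastVal_append, hne]
      · simp [pv_lastVal_append]

-- ## B's emit loop, characterised
def pvOutAcc (pairs : List (String × String)) (ks : List String) : List String :=
  ks.filterMap (fun k =>
    let v := pvLastVal pairs k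
    if PySem.Str.strip v != "" then some (k ++ "=" ++ v) else none)

theorem pv_loop (pairs : List (String × String)) :
    ∀ (suf pre : List (String × String)), pairs = pre ++ suf →
    suf.foldl (pvMergeStep pairs) (pvOutAcc pairs (pvFK (pre.map Prod.fst)), pvFK (pre.map Prod.fst))
      = (pvOutAcc pairs (pvFK ((pre ++ suf).map Prod.fst)), pvFK ((pre ++ suf).map Prod.fst)) := by
  intro suf
  induction suf with
  | nil => intro pre _; simp
  | cons kp suf ih =>
    intro pre hp
    rw [List.foldl_cons]
    have hstep : pvMergeStep pairs (pvOutAcc pairs (pvFK (pre.map Prod.fst)), pvFK (pre.map Prod.fst)) kp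
        = (pvOutAcc pairs (pvFK ((pre ++ [kp]).map Prod.fst)), pvFK ((pre ++ [kp]).map Prod.fst)) := by
      have hmapapp : (pre ++ [kp]).map Prod.fst = pre.map Prod.fst ++ [kp.1] := by simp
      rw [hmapapp, pv_fk_append]
      simp only [pvMergeStep]
      by_cases hc : kp.1 ∈ pre.map Prod.fst
      · have hcc : (pvFK (pre.map Prod.fst)).contains kp.1 = true :=
          List.contains_iff_mem.mpr ((pv_mem_fk _ _).mpr hc)
        rw [if_pos hcc, if_pos hc]
      · have hcc : (pvFK (pre.map Prod.fst)).contains kp.1 = false :=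
          Bool.eq_false_iff.mpr (fun h => hc ((pv_mem_fk _ _).mp (List.contains_iff_mem.mp h)))
        rw [if_neg (fun h => hc ((pv_mem_fk _ _).mp (List.contains_iff_mem.mp h))), if_neg hc]
        have houtapp : pvOutAcc pairs (pvFK (pre.map Prod.fst) ++ [kp.1])
            = pvOutAcc pairs (pvFK (pre.map Prod.fst)) ++ pvOutAcc pairs [kp.1] := by
          unfold pvOutAcc
          rw [List.filterMap_append]
        rw [houtapp]
        by_cases hb : PySem.Str.strip (pvLastVal pairs kp.1) = ""
        · rw [if_neg (by simp [hb]),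
              show pvOutAcc pairs [kp.1] = [] from by simp [pvOutAcc, hb],
              List.append_nil]
        · rw [if_pos (by simp [hb]),
              show pvOutAcc pairs [kp.1] = [kp.1 ++ "=" ++ pvLastVal pairs kp.1]
                from by simp [pvOutAcc, hb]]
    rw [hstep]
    have := ih (pre ++ [kp]) (by rw [hp]; simp)
    rw [List.append_assoc] at this
    simpa using this

-- ## filter-then-map over the model is filterMap over the keys
theorem pv_pipeline (pairs : List (String × String)) (ks : List String) :
    ((ks.map (fun k => (k, pvLastVal pairs k))).filter
        (fun kv => !pvIsblank kv.2)).map (fun kv => kv.1 ++ "=" ++ kv.2)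
      = pvOutAcc pairs ks := by
  induction ks with
  | nil => rfl
  | cons k ks ih =>
    rw [List.map_cons, List.filter_cons]
    unfold pvOutAcc
    rw [List.filterMap_cons]
    by_cases hb : PySem.Str.strip (pvLastVal pairs k) = ""
    · have h1 : (!pvIsblank (pvLastVal pairs k)) = false := by
        rw [pv_isblank_eq]; simp [hb]
      rw [if_neg (by simp [h1])]
      have h2 : (if PySem.Str.strip (pvLastVal pairs k) != "" then
          some (k ++ "=" ++ pvLastVal pairs k) else none) = none := by simp [hb]
      rw [h2, ih]
      rfl
    · have h1 : (!pvIsblank (pvLastVal pairs k)) = true := by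
        rw [pv_isblank_eq]; simp [hb]
      rw [if_pos (by simp [h1])]
      have h2 : (if PySem.Str.strip (pvLastVal pairs k) != "" then
          some (k ++ "=" ++ pvLastVal pairs k) else none)
          = some (k ++ "=" ++ pvLastVal pairs k) := by simp [hb]
      rw [h2, List.map_cons, ih]
      rfl

-- ## A's covertto as a fold of pvIns over parsed pairs (including the blank early return)
theorem pv_covertto_eq (s : String) :
    pvCovertto s = List.foldl pvIns PySem.Dict.empty ((pvSegs s).filterMap pvParse) := by
  unfold pvCovertto
  by_cases hs : pvIsblank s = true
  · rw [if_pos hs]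
    have hblank : PySem.Str.strip s = "" := by
      rw [pv_isblank_eq] at hs
      exact eq_of_beq hs
    rw [List.filterMap_eq_nil_iff.mpr (pv_parse_blank s hblank)]
    rfl
  · rw [if_neg (by simpa using hs)]
    exact pv_foldA _ _

-- ===== VERDICT (by name: the statement is the Claim_ definition above) =====
theorem add_or_replace_spec : Claim_equal_add_or_replace := by
  intro source dest _
  unfold Spec_add_or_replace add_or_replace add_or_replace_alt
  by_cases hd : pvIsblank dest = true
  · simp [hd]
  · have hd' : pvIsblank dest = false := by simpa using hd
    simp only [hd', Bool.false_eq_true, if_false]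
    -- B's pair list, flattened
    rw [List.foldl_cons, List.foldl_cons, List.foldl_nil, pv_foldB, pv_foldB, List.nil_append,
        show ((PySem.Str.split? source ";").getD []) = pvSegs source from rfl,
        show ((PySem.Str.split? dest ";").getD []) = pvSegs dest from rfl]
    -- A's merged dict as one fold of pvIns over the same pair list
    have hupd : (pvCovertto source).update (pvCovertto dest).items
        = List.foldl pvIns (pvCovertto source) (pvCovertto dest).items := rfl
    rw [hupd, pv_covertto_eq source, pv_covertto_eq dest,
        pv_fold_items_fold _ _ PySem.Dict.nodup_keys_empty,
        show (PySem.Dict.empty : PySem.Dict String String).items = [] from rfl, List.foldl_nil,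
        ← List.foldl_append, pv_items_model]
    -- B's emit loop, characterised
    have hloop := pv_loop
      ((pvSegs source).filterMap pvParse ++ (pvSegs dest).filterMap pvParse)
      ((pvSegs source).filterMap pvParse ++ (pvSegs dest).filterMap pvParse) [] rfl
    rw [List.map_nil, show pvFK ([] : List String) = [] from rfl,
        show pvOutAcc ((pvSegs source).filterMap pvParse ++ (pvSegs dest).filterMap pvParse) [] = []
          from rfl,
        List.nil_append] at hloop
    rw [hloop]
    unfold pvModel
    rw [pv_pipeline]
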